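-- pv_equiv track=rewrite | github.com/Lenikus/ITA | List.py | is_list_in_list
-- ===== SOURCE A (Python) =====
-- def is_list_in_list(what, where):
--     res = -1;
--     sl = len(where)
--     ssl = len(what)
--     i = 0
--     while i < sl - ssl + 1:
--         j = 0
--         while j < ssl:
--             if what[j] != where[i + j]:
--                 break
--             else:
--                 if j == ssl - 1:
--                     res = i
--             j = j + 1
--         i = i + 1
--     return res
-- ===== SOURCE B (Python) =====
-- def is_list_in_list(what, where):
--     if not what:
--         return -1
--     for i in range(len(where) - len(what), -1, -1):
--         if where[i:i + len(what)] == what: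
--             return i
--     return -1
-- ===== Notes on version B (the rewrite author's own statement) =====
-- stated objective: alternative
-- what changed: B scans candidate start positions from the right and returns at the first (i.e. greatest) match via a slice comparison, instead of A's full left-to-right nested element-by-element scan that keeps overwriting the result.
import Mathlib
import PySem

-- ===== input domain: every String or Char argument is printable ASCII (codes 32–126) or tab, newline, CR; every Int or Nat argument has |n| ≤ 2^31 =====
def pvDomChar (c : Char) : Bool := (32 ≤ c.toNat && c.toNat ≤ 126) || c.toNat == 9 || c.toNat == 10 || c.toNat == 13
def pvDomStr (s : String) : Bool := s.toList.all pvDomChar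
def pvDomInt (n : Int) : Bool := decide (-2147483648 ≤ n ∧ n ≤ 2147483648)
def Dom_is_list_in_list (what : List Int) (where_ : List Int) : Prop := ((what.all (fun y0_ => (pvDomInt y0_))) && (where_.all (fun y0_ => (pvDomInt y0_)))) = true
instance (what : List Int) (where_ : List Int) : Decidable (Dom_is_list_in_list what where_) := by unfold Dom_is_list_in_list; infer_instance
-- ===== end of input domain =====

-- B scans candidate start positions from the right and returns at the first (greatest)
-- slice match, instead of A's full left-to-right nested scan that overwrites the result.

-- ===== PORT A =====
-- inner `while j < ssl` loop; indices what[j], where[i+j] are always in range when the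
-- outer loop runs (i ≤ sl-ssl, j < ssl), so getD is exact here (Python never raises).
def isllInner (what where_ : List Int) (i : Nat) (j : Nat) (res : Int) : Int :=
  if j < what.length then
    if what.getD j 0 ≠ where_.getD (i + j) 0 then res
    else isllInner what where_ i (j + 1) (if j = what.length - 1 then (i : Int) else res)
  else res
termination_by what.length - j

-- outer `while i < sl - ssl + 1` loop
def isllOuter (what where_ : List Int) (i : Nat) (res : Int) : Int :=
  if (i : Int) < (where_.length : Int) - (what.length : Int) + 1 then
    isllOuter what where_ (i + 1) (isllInner what where_ i 0 res)
  else res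
termination_by where_.length + 1 - i
decreasing_by omega

def is_list_in_list (what : List Int) (where_ : List Int) : Int :=
  isllOuter what where_ 0 (-1)

-- ===== PORT B =====
-- `for i in range(len(where) - len(what), -1, -1)` scanning downward, slice compare
def isllAltGo (what where_ : List Int) (i : Int) : Int :=
  if i < 0 then -1
  else if PySem.List.slice where_ (some i) (some (i + (what.length : Int))) = what then i
  else isllAltGo what where_ (i - 1)
termination_by (i + 1).toNat
decreasing_by omega

def is_list_in_list_alt (what : List Int) (where_ : List Int) : Int :=
  if what = [] then -1
  else isllAltGo what where_ ((where_.length : Int) - (what.length : Int))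

-- ===== PRECONDITION & SPEC =====
def Spec_is_list_in_list (what : List Int) (where_ : List Int) (out : Int) : Prop := out = is_list_in_list_alt what where_
instance (what : List Int) (where_ : List Int) (out : Int) : Decidable (Spec_is_list_in_list what where_ out) := by unfold Spec_is_list_in_list; infer_instance

-- ===== CLAIM (what is proved, stated in full; the proofs are below) =====
def Claim_equal_is_list_in_list : Prop := ∀ (what : List Int) (where_ : List Int), Dom_is_list_in_list what where_ → Spec_is_list_in_list what where_ (is_list_in_list what where_)

-- ===== LEMMAS AND PROOFS =====

-- common spec: scan positions n-1, n-2, …, 0, return the first (greatest) match, else res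
def lastAuxD (what where_ : List Int) (res : Int) : Nat → Int
  | 0 => res
  | n + 1 => if (where_.drop n).take what.length = what then (n : Int) else lastAuxD what where_ res n

-- like lastAuxD but over the window [i, i+m)
def winLast (what where_ : List Int) (i : Nat) (res : Int) : Nat → Int
  | 0 => res
  | m + 1 => if (where_.drop (i + m)).take what.length = what then ((i + m : Nat) : Int)
             else winLast what where_ i res m

lemma winLast_zero (what where_ : List Int) (res : Int) (n : Nat) :
    winLast what where_ 0 res n = lastAuxD what where_ res n := by
  induction n with
  | zero => rfl
  | succ n ih => simp [winLast, lastAuxD, ih]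

lemma winLast_shift (what where_ : List Int) :
    ∀ (m i : Nat) (res : Int),
      winLast what where_ i res (m + 1)
        = winLast what where_ (i + 1)
            (if (where_.drop i).take what.length = what then (i : Int) else res) m := by
  intro m
  induction m with
  | zero => intro i res; simp [winLast]
  | succ m ih =>
    intro i res
    show winLast what where_ i res (m + 1 + 1) = _
    rw [show winLast what where_ i res (m + 1 + 1)
          = (if (where_.drop (i + (m+1))).take what.length = what then ((i + (m+1) : Nat) : Int)
             else winLast what where_ i res (m+1)) from rfl,
        ih]
    rw [show winLast what where_ (i+1) _ (m + 1)
          = (if (where_.drop (i + 1 + m)).take what.length = what then ((i + 1 + m : Nat) : Int)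
             else winLast what where_ (i+1) _ m) from rfl]
    have h : i + 1 + m = i + (m + 1) := by omega
    rw [h]

lemma inner_eq (what where_ : List Int) (i : Nat)
    (hb : i + what.length ≤ where_.length) :
    ∀ (n j : Nat) (res : Int), n = what.length - j → j < what.length →
      isllInner what where_ i j res
        = if (where_.drop (i + j)).take (what.length - j) = what.drop j then (i : Int) else res := by
  intro n
  induction n with
  | zero => intro j res hn hj; omega
  | succ n ih =>
    intro j res hn hj
    have hij : i + j < where_.length := by omega
    rw [isllInner, if_pos hj]
    rw [List.getD_eq_getElem what 0 hj, List.getD_eq_getElem where_ 0 hij]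
    have hdw : where_.drop (i + j) = where_[i + j] :: where_.drop (i + j + 1) :=
      List.drop_eq_getElem_cons hij
    have hdp : what.drop j = what[j] :: what.drop (j + 1) :=
      List.drop_eq_getElem_cons hj
    have hsub : what.length - j = (what.length - (j + 1)) + 1 := by omega
    rw [hdw, hdp, hsub, List.take_succ_cons]
    by_cases heq : what[j] = where_[i + j]
    · rw [if_neg (by simp [heq])]
      by_cases hlast : j + 1 < what.length
      · have hj1 : ¬ j = what.length - 1 := by omega
        rw [if_neg hj1]
        rw [ih (j + 1) res (by omega) hlast]
        have : (where_[i + j] :: (where_.drop (i + j + 1)).take (what.length - (j + 1))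
                  = what[j] :: what.drop (j + 1))
             ↔ ((where_.drop (i + j + 1)).take (what.length - (j + 1)) = what.drop (j + 1)) := by
          simp [heq]
        rw [if_congr this rfl rfl]
        have harg : i + j + 1 = i + (j + 1) := by omega
        rw [harg]
      · -- j is the last index
        have hj1 : j = what.length - 1 := by omega
        rw [if_pos hj1]
        rw [isllInner, if_neg (by omega : ¬ j + 1 < what.length)]
        have h0 : what.length - (j + 1) = 0 := by omega
        have hdp1 : what.drop (j + 1) = [] := List.drop_eq_nil_of_le (by omega)
        rw [h0, hdp1, List.take_zero, if_pos (by simp [heq])]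
    · rw [if_pos heq,
          if_neg (by intro h; exact heq (((List.cons.injEq _ _ _ _).mp h).1.symm))]

lemma outer_eq (what where_ : List Int) (h1 : 0 < what.length)
    (h2 : what.length ≤ where_.length) :
    ∀ (m i : Nat) (res : Int), i + m = where_.length - what.length + 1 →
      isllOuter what where_ i res = winLast what where_ i res m := by
  intro m
  induction m with
  | zero =>
    intro i res hi
    rw [isllOuter,
        if_neg (by omega : ¬ ((i : Int) < (where_.length : Int) - (what.length : Int) + 1))]
    rfl
  | succ m ih =>
    intro i res hi
    rw [isllOuter,
        if_pos (by omega : ((i : Int) < (where_.length : Int) - (what.length : Int) + 1))]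
    have hb : i + what.length ≤ where_.length := by omega
    have hinner := inner_eq what where_ i hb what.length 0 res (by omega) h1
    simp only [Nat.add_zero, Nat.sub_zero, List.drop_zero] at hinner
    rw [hinner, ih (i + 1) _ (by omega), winLast_shift]
    rfl

lemma outer_nil (where_ : List Int) :
    ∀ (n i : Nat) (res : Int), n = where_.length + 1 - i →
      isllOuter [] where_ i res = res := by
  intro n
  induction n with
  | zero =>
    intro i res hn
    rw [isllOuter]
    rw [if_neg (by simp; omega : ¬ ((i : Int) < (where_.length : Int) - (([] : List Int).length : Int) + 1))]
  | succ n ih =>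
    intro i res hn
    rw [isllOuter]
    split
    · rw [ih (i + 1) _ (by omega)]
      rw [isllInner]; simp
    · rfl

lemma altGo_eq (what where_ : List Int) :
    ∀ (n : Nat), isllAltGo what where_ ((n : Int) - 1) = lastAuxD what where_ (-1) n := by
  intro n
  induction n with
  | zero => rw [isllAltGo]; simp [lastAuxD]
  | succ n ih =>
    rw [isllAltGo]
    have h0 : ¬ (((n + 1 : Nat) : Int) - 1 < 0) := by push_cast; omega
    rw [if_neg h0]
    have h1 : ((n + 1 : Nat) : Int) - 1 = ((n : Nat) : Int) := by push_cast; ring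
    rw [h1, PySem.List.slice_natCast_add]
    show (if (where_.drop n).take what.length = what then ((n : Nat) : Int)
          else isllAltGo what where_ (((n : Nat) : Int) - 1)) = lastAuxD what where_ (-1) (n + 1)
    rw [show lastAuxD what where_ (-1) (n + 1)
          = (if (where_.drop n).take what.length = what then ((n : Nat) : Int)
             else lastAuxD what where_ (-1) n) from rfl]
    split
    · rfl
    · exact ih

-- ===== VERDICT (by name: the statement is the Claim_ definition above) =====
theorem is_list_in_list_spec : Claim_equal_is_list_in_list := by
  intro what where_ _
  unfold Spec_is_list_in_list is_list_in_list is_list_in_list_alt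
  by_cases hnil : what = []
  · subst hnil
    rw [if_pos rfl]
    exact outer_nil where_ (where_.length + 1) 0 (-1) (by omega)
  · rw [if_neg hnil]
    have h1 : 0 < what.length := List.length_pos_iff.mpr hnil
    by_cases h2 : what.length ≤ where_.length
    · have hN : (0 : Nat) + (where_.length - what.length + 1) = where_.length - what.length + 1 := by omega
      rw [outer_eq what where_ h1 h2 (where_.length - what.length + 1) 0 (-1) hN]
      rw [winLast_zero]
      have := altGo_eq what where_ (where_.length - what.length + 1)
      have hc : (((where_.length - what.length + 1 : Nat)) : Int) - 1
          = (where_.length : Int) - (what.length : Int) := by omega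
      rw [hc] at this
      rw [this]
    · -- pattern longer than text: both loops do nothing
      rw [isllOuter]
      rw [if_neg (by push_cast; omega : ¬ (((0 : Nat) : Int) < (where_.length : Int) - (what.length : Int) + 1))]
      rw [isllAltGo]
      rw [if_pos (by omega)]
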